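-- pv_equiv track=rewrite | github.com/iliasse-sudo/A-Maze-ing | maze/generator.py | compute_42_cells
-- ===== SOURCE A (Python) =====
-- def compute_42_cells(width: int, height: int) -> list[tuple[int, int]]:
--     """Compute cells that form the '42' pattern obstacle.
--
--     Args:
--         width: Maze width in cells.
--         height: Maze height in cells.
--
--     Returns:
--         List of (x, y) coordinates for the 42 pattern cells.
--         Returns empty list if maze is too small.
--     """
--     MIN_W, MIN_H = 10, 8
--     if width < MIN_W or height < MIN_H:
--         return []
--
--     cx: int = width // 2
--     cy: int = height // 2
--
--     forty_two_offsets: list[tuple[int, int]] = [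
--         (cx - 3, cy - 2),
--         (cx - 1, cy - 2),
--         (cx - 3, cy - 1),
--         (cx - 1, cy - 1),
--         (cx - 3, cy),
--         (cx - 2, cy),
--         (cx - 1, cy),
--         (cx - 1, cy + 1),
--         (cx - 1, cy + 2),
--         (cx + 1, cy - 2),
--         (cx + 2, cy - 2),
--         (cx + 3, cy - 2),
--         (cx + 3, cy - 1),
--         (cx + 1, cy),
--         (cx + 2, cy),
--         (cx + 3, cy),
--         (cx + 1, cy + 1),
--         (cx + 1, cy + 2),
--         (cx + 2, cy + 2),
--         (cx + 3, cy + 2),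
--     ]
--
--     valid_cells = [
--         (x, y)
--         for (x, y) in forty_two_offsets
--         if 0 <= x < width and 0 <= y < height
--     ]
--
--     return valid_cells
-- ===== SOURCE B (Python) =====
-- FOUR = ["X.X", "X.X", "XXX", "..X", "..X"]
-- TWO = ["XXX", "..X", "XXX", "X..", "XXX"]
--
--
-- def _glyph_offsets(grid):
--     """(dx, dy) offsets of the 'X' cells, rows outer, columns inner."""
--     return [
--         (dx, dy)
--         for dy, row in enumerate(grid)
--         for dx, ch in enumerate(row)
--         if ch == "X"
--     ]
--
--
-- def compute_42_cells(width: int, height: int) -> list[tuple[int, int]]: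
--     if width < 10 or height < 8:
--         return []
--     cx, cy = width // 2, height // 2
--     cells = [
--         (x0 + dx, cy - 2 + dy)
--         for grid, x0 in ((FOUR, cx - 3), (TWO, cx + 1))
--         for dx, dy in _glyph_offsets(grid)
--     ]
--     return [(x, y) for (x, y) in cells if 0 <= x < width and 0 <= y < height]
-- ===== Notes on version B (the rewrite author's own statement) =====
-- stated objective: idiomatic
-- what changed: Replaces the hardcoded 20-coordinate list with two ASCII-art glyph grids ('4' and '2') scanned row by row, emitting a cell per 'X'; the bounds filter and small-maze early return are unchanged.
import Mathlib
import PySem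

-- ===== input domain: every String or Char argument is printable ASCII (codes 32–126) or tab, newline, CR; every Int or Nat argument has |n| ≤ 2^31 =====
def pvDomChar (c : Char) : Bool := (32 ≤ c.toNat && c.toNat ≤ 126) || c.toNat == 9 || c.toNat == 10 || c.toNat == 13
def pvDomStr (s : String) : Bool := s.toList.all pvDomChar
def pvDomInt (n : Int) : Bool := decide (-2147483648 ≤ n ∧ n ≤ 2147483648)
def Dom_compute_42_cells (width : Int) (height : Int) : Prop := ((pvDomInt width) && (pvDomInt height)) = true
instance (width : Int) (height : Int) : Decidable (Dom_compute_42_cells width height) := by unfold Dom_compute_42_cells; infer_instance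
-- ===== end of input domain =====

-- B replaces A's hardcoded 20-coordinate list with two ASCII-art glyph grids ('4' and '2') scanned row by row (more idiomatic; return value identical).

-- ===== PORT A =====
def compute_42_cells (width : Int) (height : Int) : List (Int × Int) :=
  if width < 10 || height < 8 then []
  else
    let cx : Int := PySem.Int.floordiv width 2
    let cy : Int := PySem.Int.floordiv height 2
    let forty_two_offsets : List (Int × Int) :=
      [ (cx - 3, cy - 2), (cx - 1, cy - 2),
        (cx - 3, cy - 1), (cx - 1, cy - 1),
        (cx - 3, cy), (cx - 2, cy), (cx - 1, cy),
        (cx - 1, cy + 1),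
        (cx - 1, cy + 2),
        (cx + 1, cy - 2), (cx + 2, cy - 2), (cx + 3, cy - 2),
        (cx + 3, cy - 1),
        (cx + 1, cy), (cx + 2, cy), (cx + 3, cy),
        (cx + 1, cy + 1),
        (cx + 1, cy + 2), (cx + 2, cy + 2), (cx + 3, cy + 2) ]
    forty_two_offsets.filter (fun p => decide (0 ≤ p.1 ∧ p.1 < width ∧ 0 ≤ p.2 ∧ p.2 < height))

-- ===== PORT B =====
def pvFOUR : List String := ["X.X", "X.X", "XXX", "..X", "..X"]
def pvTWO : List String := ["XXX", "..X", "XXX", "X..", "XXX"]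

-- (dx, dy) offsets of the 'X' cells, rows outer, columns inner (B's _glyph_offsets)
def pvGlyphOffsets (grid : List String) : List (Int × Int) :=
  (PySem.List.enumerate grid).flatMap (fun r =>
    (PySem.List.enumerate r.2.toList).filterMap (fun c =>
      if c.2 = 'X' then some (c.1, r.1) else none))

def compute_42_cells_alt (width : Int) (height : Int) : List (Int × Int) :=
  if width < 10 || height < 8 then []
  else
    let cx : Int := PySem.Int.floordiv width 2
    let cy : Int := PySem.Int.floordiv height 2
    let cells : List (Int × Int) :=
      [(pvFOUR, cx - 3), (pvTWO, cx + 1)].flatMap (fun g =>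
        (pvGlyphOffsets g.1).map (fun d => (g.2 + d.1, cy - 2 + d.2)))
    cells.filter (fun p => decide (0 ≤ p.1 ∧ p.1 < width ∧ 0 ≤ p.2 ∧ p.2 < height))

-- ===== PRECONDITION & SPEC =====
def Spec_compute_42_cells (width : Int) (height : Int) (out : List (Int × Int)) : Prop := out = compute_42_cells_alt width height
instance (width : Int) (height : Int) (out : List (Int × Int)) : Decidable (Spec_compute_42_cells width height out) := by unfold Spec_compute_42_cells; infer_instance

-- ===== CLAIM (what is proved, stated in full; the proofs are below) =====
def Claim_equal_compute_42_cells : Prop := ∀ (width : Int) (height : Int), Dom_compute_42_cells width height → Spec_compute_42_cells width height (compute_42_cells width height)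

-- ===== LEMMAS AND PROOFS =====
theorem pvGlyphOffsets_four :
    pvGlyphOffsets pvFOUR = [(0,0),(2,0),(0,1),(2,1),(0,2),(1,2),(2,2),(2,3),(2,4)] := by decide

theorem pvGlyphOffsets_two :
    pvGlyphOffsets pvTWO = [(0,0),(1,0),(2,0),(2,1),(0,2),(1,2),(2,2),(0,3),(0,4),(1,4),(2,4)] := by decide

theorem pvCells_eq (cx cy : Int) :
    [(pvFOUR, cx - 3), (pvTWO, cx + 1)].flatMap (fun g =>
        (pvGlyphOffsets g.1).map (fun d => (g.2 + d.1, cy - 2 + d.2))) =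
    [ (cx - 3, cy - 2), (cx - 1, cy - 2),
      (cx - 3, cy - 1), (cx - 1, cy - 1),
      (cx - 3, cy), (cx - 2, cy), (cx - 1, cy),
      (cx - 1, cy + 1),
      (cx - 1, cy + 2),
      (cx + 1, cy - 2), (cx + 2, cy - 2), (cx + 3, cy - 2),
      (cx + 3, cy - 1),
      (cx + 1, cy), (cx + 2, cy), (cx + 3, cy),
      (cx + 1, cy + 1),
      (cx + 1, cy + 2), (cx + 2, cy + 2), (cx + 3, cy + 2) ] := by
  simp only [List.flatMap_cons, List.flatMap_nil, pvGlyphOffsets_four, pvGlyphOffsets_two,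
    List.map_cons, List.map_nil, List.append_nil, List.cons_append, List.nil_append,
    List.cons.injEq, Prod.mk.injEq, and_true]
  omega

-- ===== VERDICT (by name: the statement is the Claim_ definition above) =====
theorem compute_42_cells_spec : Claim_equal_compute_42_cells := by
  intro width height _
  unfold Spec_compute_42_cells compute_42_cells compute_42_cells_alt
  by_cases h : (width < 10 || height < 8) = true
  · simp [h]
  · simp only [h]
    rw [pvCells_eq]
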